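-- pv_equiv track=rewrite | github.com/Sean-323/Algorithm | 백준/Silver/8911. 거북이/거북이.py | turtle
-- ===== SOURCE A (Python) =====
-- def turtle(command):
--     x, y = 0, 0  # 현재 위치
--     direction = 0  # # 0: 북, 1: 동, 2: 남, 3: 서 (리스트 위치별 방향)
--
--     dx = [0, 1, 0, -1]  # 북 : 0 동 : 1 남 : 0 서 : -1
--     dy = [1, 0, -1, 0]
--
--     visited = [(x, y)]
--
--     for c in command:
--         if c == 'F':
--             x += dx[direction]
--             y += dy[direction]
--         elif c == 'B':
--             x -= dx[direction]
--             y -= dy[direction]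
--         elif c == 'L':
--             direction = (direction + 3) % 4
--         elif c == 'R':
--             direction = (direction + 1) % 4
--         visited.append((x, y))
--
--     # •	direction = (direction + 3) % 4: 왼쪽으로 90도 회전
--     # •	현재 방향에서 3을 더하고 4로 나눈 나머지를 계산합니다. 이는 시계 반대 방향으로 90도 회전한 효과를 줍니다.
--     # •	예: 방향이 북쪽(0)일 때, (0 + 3) % 4 = 3이므로 서쪽(3)이 됩니다.
--     # •	direction = (direction + 1) % 4: 오른쪽으로 90도 회전
--     # •	현재 방향에서 1을 더하고 4로 나눈 나머지를 계산합니다. 이는 시계 방향으로 90도 회전한 효과를 줍니다.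
--     # •	예: 방향이 북쪽(0)일 때, (0 + 1) % 4 = 1이므로 동쪽(1)이 됩니다.
--
--     # x 좌표의 최소값을 구합니다.
--     min_x = min(v[0] for v in visited)  # v[0]은 각 튜플의 첫 번째 요소, 즉 x 값을 의미합니다.
--     # x 좌표의 최대값을 구합니다.
--     max_x = max(v[0] for v in visited)  # v[0]은 각 튜플의 첫 번째 요소, 즉 x 값을 의미합니다.
--     # y 좌표의 최소값을 구합니다.
--     min_y = min(v[1] for v in visited)  # v[1]은 각 튜플의 두 번째 요소, 즉 y 값을 의미합니다.
--     # y 좌표의 최대값을 구합니다.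
--     max_y = max(v[1] for v in visited)  # v[1]은 각 튜플의 두 번째 요소, 즉 y 값을 의미합니다.
--
--     area = (max_x - min_x) * (max_y - min_y)
--     return area
-- ===== SOURCE B (Python) =====
-- def turtle(command):
--     # One streaming pass: direction kept as a unit vector (rotated in place),
--     # bounding-box extrema updated per step; no visited list, no tables.
--     x = y = 0
--     dx, dy = 0, 1  # facing north
--     min_x = max_x = min_y = max_y = 0
--     for c in command:
--         if c == 'F':
--             x += dx
--             y += dy
--         elif c == 'B':
--             x -= dx
--             y -= dy
--         elif c == 'L':
--             dx, dy = -dy, dx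
--         elif c == 'R':
--             dx, dy = dy, -dx
--         if x < min_x: min_x = x
--         if x > max_x: max_x = x
--         if y < min_y: min_y = y
--         if y > max_y: max_y = y
--     return (max_x - min_x) * (max_y - min_y)
-- ===== Notes on version B (the rewrite author's own statement) =====
-- stated objective: faster
-- what changed: Replaces the direction-index with dx/dy lookup tables and the build-visited-list-then-four-min/max-scans structure by a single streaming pass that rotates a unit direction vector in place and updates the four bounding-box extrema as it goes.
import Mathlib
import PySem

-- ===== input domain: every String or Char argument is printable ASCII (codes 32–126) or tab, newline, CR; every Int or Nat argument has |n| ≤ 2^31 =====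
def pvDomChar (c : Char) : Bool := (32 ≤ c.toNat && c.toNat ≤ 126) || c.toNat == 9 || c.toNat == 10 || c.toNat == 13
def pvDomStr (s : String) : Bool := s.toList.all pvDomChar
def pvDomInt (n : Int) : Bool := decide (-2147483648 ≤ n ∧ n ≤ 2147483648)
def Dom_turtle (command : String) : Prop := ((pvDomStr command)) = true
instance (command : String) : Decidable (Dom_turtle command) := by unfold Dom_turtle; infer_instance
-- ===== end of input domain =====

-- B replaces A's direction-index + dx/dy lookup tables and the visited-list-then-four-scans
-- structure by one streaming pass that rotates a unit direction vector and updates the extrema in place.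


-- ===== PORT A =====
-- state: (x, y, direction, visited)
def turtleStepA (st : Int × Int × Int × List (Int × Int)) (c : Char) :
    Int × Int × Int × List (Int × Int) :=
  let (x, y, d, vis) := st
  let dxl : List Int := [0, 1, 0, -1]
  let dyl : List Int := [1, 0, -1, 0]
  if c = 'F' then
    let x' := x + PySem.List.pyGetD dxl d 0   -- d ∈ [0,4): exact
    let y' := y + PySem.List.pyGetD dyl d 0
    (x', y', d, vis ++ [(x', y')])
  else if c = 'B' then
    let x' := x - PySem.List.pyGetD dxl d 0
    let y' := y - PySem.List.pyGetD dyl d 0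
    (x', y', d, vis ++ [(x', y')])
  else if c = 'L' then (x, y, PySem.Int.mod (d + 3) 4, vis ++ [(x, y)])
  else if c = 'R' then (x, y, PySem.Int.mod (d + 1) 4, vis ++ [(x, y)])
  else (x, y, d, vis ++ [(x, y)])

def turtle (command : String) : Int :=
  let st := command.toList.foldl turtleStepA (0, 0, 0, [(0, 0)])
  let vis := st.2.2.2
  -- visited is never empty (it starts with (0,0)), so min()/max() never raise: .getD 0 is unreachable
  let min_x := (PySem.List.min? (vis.map Prod.fst) (fun v => v)).getD 0
  let max_x := (PySem.List.max? (vis.map Prod.fst) (fun v => v)).getD 0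
  let min_y := (PySem.List.min? (vis.map Prod.snd) (fun v => v)).getD 0
  let max_y := (PySem.List.max? (vis.map Prod.snd) (fun v => v)).getD 0
  (max_x - min_x) * (max_y - min_y)

-- ===== PORT B =====
-- state: ((x, y), (dx, dy), (min_x, max_x), (min_y, max_y))
def turtleStepB (st : (Int × Int) × (Int × Int) × (Int × Int) × (Int × Int)) (c : Char) :
    (Int × Int) × (Int × Int) × (Int × Int) × (Int × Int) :=
  let ((x, y), (dx, dy), (mnx, mxx), (mny, mxy)) := st
  let (x, y, dx, dy) :=
    if c = 'F' then (x + dx, y + dy, dx, dy)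
    else if c = 'B' then (x - dx, y - dy, dx, dy)
    else if c = 'L' then (x, y, -dy, dx)
    else if c = 'R' then (x, y, dy, -dx)
    else (x, y, dx, dy)
  ((x, y), (dx, dy),
   (if x < mnx then x else mnx, if x > mxx then x else mxx),
   (if y < mny then y else mny, if y > mxy then y else mxy))

def turtle_alt (command : String) : Int :=
  let st := command.toList.foldl turtleStepB ((0, 0), (0, 1), (0, 0), (0, 0))
  (st.2.2.1.2 - st.2.2.1.1) * (st.2.2.2.2 - st.2.2.2.1)

-- ===== PRECONDITION & SPEC =====
def Spec_turtle (command : String) (out : Int) : Prop := out = turtle_alt command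
instance (command : String) (out : Int) : Decidable (Spec_turtle command out) := by unfold Spec_turtle; infer_instance

-- ===== CLAIM (what is proved, stated in full; the proofs are below) =====
def Claim_equal_turtle : Prop := ∀ (command : String), Dom_turtle command → Spec_turtle command (turtle command)

-- ===== LEMMAS AND PROOFS =====

theorem minId_append (xs : List Int) (a m : Int)
    (h : PySem.List.min? xs (fun v => v) = some m) :
    PySem.List.min? (xs ++ [a]) (fun v => v) = some (min m a) := by
  cases xs with
  | nil => simp [PySem.List.min?] at h
  | cons x t =>
    rw [PySem.List.min?_id_cons] at h
    rw [List.cons_append, PySem.List.min?_id_cons, List.foldl_append]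
    simp_all

theorem maxId_append (xs : List Int) (a m : Int)
    (h : PySem.List.max? xs (fun v => v) = some m) :
    PySem.List.max? (xs ++ [a]) (fun v => v) = some (max m a) := by
  cases xs with
  | nil => simp [PySem.List.max?] at h
  | cons x t =>
    rw [PySem.List.max?_id_cons] at h
    rw [List.cons_append, PySem.List.max?_id_cons, List.foldl_append]
    simp_all

-- the relation between A's loop state and B's loop state
def TInv (a : Int × Int × Int × List (Int × Int))
    (b : (Int × Int) × (Int × Int) × (Int × Int) × (Int × Int)) : Prop :=
  b.1.1 = a.1 ∧ b.1.2 = a.2.1 ∧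
  0 ≤ a.2.2.1 ∧ a.2.2.1 < 4 ∧
  b.2.1.1 = PySem.List.pyGetD ([0, 1, 0, -1] : List Int) a.2.2.1 0 ∧
  b.2.1.2 = PySem.List.pyGetD ([1, 0, -1, 0] : List Int) a.2.2.1 0 ∧
  PySem.List.min? (a.2.2.2.map Prod.fst) (fun v => v) = some b.2.2.1.1 ∧
  PySem.List.max? (a.2.2.2.map Prod.fst) (fun v => v) = some b.2.2.1.2 ∧
  PySem.List.min? (a.2.2.2.map Prod.snd) (fun v => v) = some b.2.2.2.1 ∧
  PySem.List.max? (a.2.2.2.map Prod.snd) (fun v => v) = some b.2.2.2.2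

theorem minId_app (xs : List Int) (a m : Int)
    (h : PySem.List.min? xs (fun v => v) = some m) :
    PySem.List.min? (xs ++ [a]) (fun v => v) = some (if a < m then a else m) := by
  rw [minId_append _ _ _ h]; congr 1; simp [min_def]; omega

theorem maxId_app (xs : List Int) (a m : Int)
    (h : PySem.List.max? xs (fun v => v) = some m) :
    PySem.List.max? (xs ++ [a]) (fun v => v) = some (if a > m then a else m) := by
  rw [maxId_append _ _ _ h]; congr 1; simp [max_def]; omega

theorem tinv_step (a : Int × Int × Int × List (Int × Int))
    (b : (Int × Int) × (Int × Int) × (Int × Int) × (Int × Int)) (c : Char)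
    (h : TInv a b) : TInv (turtleStepA a c) (turtleStepB b c) := by
  obtain ⟨x, y, d, vis⟩ := a
  obtain ⟨⟨bx, by'⟩, ⟨dx, dy⟩, ⟨mnx, mxx⟩, ⟨mny, mxy⟩⟩ := b
  obtain ⟨h1, h2, hd0, hd4, hdx, hdy, hmn, hmx, hmn2, hmx2⟩ := h
  simp only at h1 h2 hdx hdy hmn hmx hmn2 hmx2 hd0 hd4
  subst h1 h2 hdx hdy
  by_cases hF : c = 'F'
  · subst hF
    simp only [turtleStepA, turtleStepB, Char.reduceEq, reduceIte]
    refine ⟨rfl, rfl, hd0, hd4, rfl, rfl, ?_, ?_, ?_, ?_⟩ <;>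
      simp only [List.map_append, List.map_cons, List.map_nil]
    · exact minId_app _ _ _ hmn
    · exact maxId_app _ _ _ hmx
    · exact minId_app _ _ _ hmn2
    · exact maxId_app _ _ _ hmx2
  by_cases hB : c = 'B'
  · subst hB
    simp only [turtleStepA, turtleStepB, Char.reduceEq, reduceIte]
    refine ⟨rfl, rfl, hd0, hd4, rfl, rfl, ?_, ?_, ?_, ?_⟩ <;>
      simp only [List.map_append, List.map_cons, List.map_nil]
    · exact minId_app _ _ _ hmn
    · exact maxId_app _ _ _ hmx
    · exact minId_app _ _ _ hmn2
    · exact maxId_app _ _ _ hmx2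
  by_cases hL : c = 'L'
  · subst hL
    simp only [turtleStepA, turtleStepB, Char.reduceEq, reduceIte]
    refine ⟨rfl, rfl, PySem.Int.mod_nonneg _ (by norm_num), PySem.Int.mod_lt _ (by norm_num),
        ?_, ?_, ?_, ?_, ?_, ?_⟩
    · interval_cases d <;> norm_num [PySem.Int.mod, PySem.List.pyGetD, PySem.List.pyGet?, PySem.List.pyIdx?] <;> decide
    · interval_cases d <;> norm_num [PySem.Int.mod, PySem.List.pyGetD, PySem.List.pyGet?, PySem.List.pyIdx?] <;> decide
    all_goals simp only [List.map_append, List.map_cons, List.map_nil]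
    · exact minId_app _ _ _ hmn
    · exact maxId_app _ _ _ hmx
    · exact minId_app _ _ _ hmn2
    · exact maxId_app _ _ _ hmx2
  by_cases hR : c = 'R'
  · subst hR
    simp only [turtleStepA, turtleStepB, Char.reduceEq, reduceIte]
    refine ⟨rfl, rfl, PySem.Int.mod_nonneg _ (by norm_num), PySem.Int.mod_lt _ (by norm_num),
        ?_, ?_, ?_, ?_, ?_, ?_⟩
    · interval_cases d <;> norm_num [PySem.Int.mod, PySem.List.pyGetD, PySem.List.pyGet?, PySem.List.pyIdx?] <;> decide
    · interval_cases d <;> norm_num [PySem.Int.mod, PySem.List.pyGetD, PySem.List.pyGet?, PySem.List.pyIdx?] <;> decide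
    all_goals simp only [List.map_append, List.map_cons, List.map_nil]
    · exact minId_app _ _ _ hmn
    · exact maxId_app _ _ _ hmx
    · exact minId_app _ _ _ hmn2
    · exact maxId_app _ _ _ hmx2
  · simp only [turtleStepA, turtleStepB, if_neg hF, if_neg hB, if_neg hL, if_neg hR]
    refine ⟨rfl, rfl, hd0, hd4, rfl, rfl, ?_, ?_, ?_, ?_⟩ <;>
      simp only [List.map_append, List.map_cons, List.map_nil]
    · exact minId_app _ _ _ hmn
    · exact maxId_app _ _ _ hmx
    · exact minId_app _ _ _ hmn2
    · exact maxId_app _ _ _ hmx2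

theorem tinv_foldl (cs : List Char)
    (a : Int × Int × Int × List (Int × Int))
    (b : (Int × Int) × (Int × Int) × (Int × Int) × (Int × Int))
    (h : TInv a b) : TInv (cs.foldl turtleStepA a) (cs.foldl turtleStepB b) := by
  induction cs generalizing a b with
  | nil => exact h
  | cons c cs ih => exact ih _ _ (tinv_step a b c h)

-- ===== VERDICT (by name: the statement is the Claim_ definition above) =====
theorem turtle_spec : Claim_equal_turtle := by
  intro command _
  unfold Spec_turtle turtle turtle_alt
  have h := tinv_foldl command.toList (0, 0, 0, [(0, 0)]) ((0, 0), (0, 1), (0, 0), (0, 0))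
    ⟨rfl, rfl, by decide, by decide, by decide, by decide, by decide, by decide, by decide,
      by decide⟩
  obtain ⟨-, -, -, -, -, -, hmn, hmx, hmn2, hmx2⟩ := h
  simp only [hmn, hmx, hmn2, hmx2, Option.getD_some]
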